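-- pv_equiv track=rewrite | github.com/tamnguyen30/TAED-System | src/evaluate_hybrid_v3.py | generate_perturbations
-- ===== SOURCE A (Python) =====
-- HOMOGLYPHS = {
--     '@': 'a', '1': 'i', '0': 'o', '3': 'e', '$': 's', '!': 'i',
--     '5': 's', '7': 't', '4': 'a'
-- }
--
-- def generate_perturbations(text):
--     variants = []
--     v1 = text
--     for char, replacement in HOMOGLYPHS.items():
--         if replacement in v1:
--             v1 = v1.replace(replacement, char)
--     variants.append(v1)
--     words = text.split()
--     if len(words) > 2:
--         v2 = words.copy()
--         v2[0], v2[1] = v2[1], v2[0]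
--         variants.append(' '.join(v2))
--     chars = list(text)
--     if len(chars) > 5:
--         chars[2], chars[3] = chars[3], chars[2]
--     variants.append(''.join(chars))
--     return variants
-- ===== SOURCE B (Python) =====
-- HOMOGLYPHS = {
--     '@': 'a', '1': 'i', '0': 'o', '3': 'e', '$': 's', '!': 'i',
--     '5': 's', '7': 't', '4': 'a'
-- }
--
-- # reverse table: letter -> homoglyph, first occurrence in HOMOGLYPHS wins
-- _REV = {}
-- for _char, _repl in HOMOGLYPHS.items():
--     _REV.setdefault(_repl, _char)
--
-- def generate_perturbations(text):
--     variants = [''.join(_REV.get(c, c) for c in text)]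
--     words = text.split()
--     if len(words) > 2:
--         variants.append(' '.join([words[1], words[0]] + words[2:]))
--     chars = list(text)
--     if len(chars) > 5:
--         chars[2], chars[3] = chars[3], chars[2]
--     variants.append(''.join(chars))
--     return variants
-- ===== Notes on version B (the rewrite author's own statement) =====
-- stated objective: alternative
-- what changed: Replaces the nine successive conditional full-string str.replace passes by a single per-character translation through a reverse homoglyph table built once with setdefault (first key wins), and builds the swapped word list directly instead of copy-and-swap.
import Mathlib
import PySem

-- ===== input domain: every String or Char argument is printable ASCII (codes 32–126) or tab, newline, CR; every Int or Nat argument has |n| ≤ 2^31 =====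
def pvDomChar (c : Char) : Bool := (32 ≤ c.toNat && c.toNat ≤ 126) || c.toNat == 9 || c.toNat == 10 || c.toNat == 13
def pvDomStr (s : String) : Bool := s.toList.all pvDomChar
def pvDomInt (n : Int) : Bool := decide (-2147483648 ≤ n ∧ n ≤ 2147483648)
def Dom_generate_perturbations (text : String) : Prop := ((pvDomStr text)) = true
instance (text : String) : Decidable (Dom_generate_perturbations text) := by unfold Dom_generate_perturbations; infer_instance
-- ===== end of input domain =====

-- B replaces the nine conditional full-string str.replace passes by ONE per-character pass
-- through a reverse homoglyph table built once (first key wins), and builds the swapped word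
-- list directly; same return value ('alternative', no speed claim).

-- ===== PORT A =====
def HOMOGLYPHS : PySem.Dict String String :=
  PySem.Dict.mk [("@","a"),("1","i"),("0","o"),("3","e"),("$","s"),("!","i"),("5","s"),("7","t"),("4","a")]

def generate_perturbations (text : String) : List String :=
  let v1 := HOMOGLYPHS.items.foldl
    (fun v1 p => if PySem.Str.isIn p.2 v1 then PySem.Str.replace v1 p.2 p.1 else v1) text
  let variants := [v1]
  let words := PySem.Str.split₀ text
  let variants := if words.length > 2 then
      let v2 := (words.set 0 (words.getD 1 "")).set 1 (words.getD 0 "")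
      variants ++ [PySem.Str.join " " v2]
    else variants
  let chars := text.toList
  let chars := if chars.length > 5 then
      (chars.set 2 (chars.getD 3 ' ')).set 3 (chars.getD 2 ' ')
    else chars
  variants ++ [String.ofList chars]

-- ===== PORT B =====
-- reverse table: letter -> homoglyph, first occurrence in HOMOGLYPHS wins (setdefault)
def revMap : PySem.Dict String String :=
  HOMOGLYPHS.items.foldl (fun d p => d.setdefault p.2 p.1) PySem.Dict.empty

def generate_perturbations_alt (text : String) : List String :=
  let v1 := PySem.Str.join ""
    (text.toList.map (fun c => revMap.getD (String.ofList [c]) (String.ofList [c])))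
  let variants := [v1]
  let words := PySem.Str.split₀ text
  let variants := if words.length > 2 then
      variants ++ [PySem.Str.join " "
        ([words.getD 1 "", words.getD 0 ""] ++ PySem.List.slice words (some 2) none)]
    else variants
  let chars := text.toList
  let chars := if chars.length > 5 then
      (chars.set 2 (chars.getD 3 ' ')).set 3 (chars.getD 2 ' ')
    else chars
  variants ++ [String.ofList chars]

-- ===== PRECONDITION & SPEC =====
def Spec_generate_perturbations (text : String) (out : List String) : Prop := out = generate_perturbations_alt text
instance (text : String) (out : List String) : Decidable (Spec_generate_perturbations text out) := by unfold Spec_generate_perturbations; infer_instance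

-- ===== CLAIM (what is proved, stated in full; the proofs are below) =====
def Claim_equal_generate_perturbations : Prop := ∀ (text : String), Dom_generate_perturbations text → Spec_generate_perturbations text (generate_perturbations text)

-- ===== LEMMAS AND PROOFS =====

theorem go_single (a b : Char) : ∀ (fuel : Nat) (l acc : List Char), l.length ≤ fuel →
    PySem.Chars.replace.go [a] [b] fuel l acc
      = acc.reverse ++ l.map (fun c => if c = a then b else c) := by
  intro fuel
  induction fuel with
  | zero =>
    intro l acc h
    have : l = [] := List.eq_nil_of_length_eq_zero (Nat.le_zero.mp h)
    subst this; simp [PySem.Chars.replace.go]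
  | succ n ih =>
    intro l acc h
    cases l with
    | nil => simp [PySem.Chars.replace.go]
    | cons c t =>
      simp only [PySem.Chars.replace.go]
      by_cases hc : c = a
      · subst hc
        rw [if_pos (by simp [List.isPrefixOf])]
        rw [show List.drop [c].length (c :: t) = t from rfl]
        rw [ih t _ (by simpa using h)]
        simp
      · rw [if_neg (by simp [List.isPrefixOf, Ne.symm hc])]
        rw [ih t _ (by simpa using h)]
        simp [hc]

theorem replace_single (s : List Char) (a b : Char) :
    PySem.Chars.replace s [a] [b] = s.map (fun c => if c = a then b else c) := by
  simp only [PySem.Chars.replace, List.isEmpty]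
  rw [go_single a b s.length s [] (le_refl _)]
  simp

theorem singleton_infix_iff (a : Char) (l : List Char) : [a] <:+: l ↔ a ∈ l := by
  constructor
  · intro h; exact h.mem (by simp)
  · intro h; obtain ⟨p, q, rfl⟩ := List.mem_iff_append.mp h
    exact ⟨p, q, by simp⟩

-- one conditional replace pass of A, expressed as a per-character map
theorem stepEq (v old new : String) (a b : Char)
    (ho : old.toList = [a]) (hn : new.toList = [b]) :
    (if PySem.Str.isIn old v then PySem.Str.replace v old new else v)
      = String.ofList (v.toList.map (fun c => if c = a then b else c)) := by
  by_cases h : PySem.Str.isIn old v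
  · rw [if_pos h]
    apply String.toList_inj.mp
    rw [PySem.Str.toList_replace, ho, hn, replace_single, String.toList_ofList]
  · rw [if_neg h]
    have hmem : a ∉ v.toList := by
      intro hm
      apply h
      rw [PySem.Str.isIn_eq, ho]
      exact (PySem.Chars.isIn_iff_infix _ _).mpr ((singleton_infix_iff a v.toList).mpr hm)
    apply String.toList_inj.mp
    rw [String.toList_ofList]
    conv_lhs => rw [← List.map_id v.toList]
    exact (List.map_congr_left (fun c hc => by
      have : c ≠ a := fun e => hmem (e ▸ hc)
      simp [this])).symm

-- the per-character translation B's reverse table computes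
def revChar (c : Char) : Char :=
  if c = 'a' then '@' else if c = 'i' then '1' else if c = 'o' then '0'
  else if c = 'e' then '3' else if c = 's' then '$' else if c = 't' then '7' else c

theorem revMap_eval : revMap = PySem.Dict.mk [("a","@"),("i","1"),("o","0"),("e","3"),("s","$"),("t","7")] := by
  decide

theorem ofList_beq (l m : List Char) : (String.ofList l == String.ofList m) = (l == m) := by
  cases h : l == m
  · simp only [beq_eq_false_iff_ne] at h
    simpa using fun e => h (by simpa using congrArg String.toList e)
  · simp only [beq_iff_eq] at h
    simp [h]

theorem revMap_getD (c : Char) :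
    revMap.getD (String.ofList [c]) (String.ofList [c]) = String.ofList [revChar c] := by
  rw [revMap_eval, PySem.Dict.getD_eq_get?_getD]
  have e : ∀ (a : Char) (s : String), s.toList = [a] →
      (s == String.ofList [c]) = (c == a) := by
    intro a s hs
    have hsE : s = String.ofList [a] := String.toList_inj.mp (by simpa using hs)
    subst hsE
    rw [ofList_beq]
    cases hca : c == a
    · have hne : ¬ c = a := by simpa using hca
      simp [Ne.symm hne]
    · have heq : c = a := by simpa using hca
      simp [heq]
  simp only [PySem.Dict.get?_mk_cons, e 'a' "a" rfl, e 'i' "i" rfl, e 'o' "o" rfl,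
    e 'e' "e" rfl, e 's' "s" rfl, e 't' "t" rfl, revChar]
  by_cases h1 : c = 'a' <;> by_cases h2 : c = 'i' <;> by_cases h3 : c = 'o' <;>
    by_cases h4 : c = 'e' <;> by_cases h5 : c = 's' <;> by_cases h6 : c = 't' <;>
    simp_all [PySem.Dict.get?]

set_option maxHeartbeats 1000000 in
theorem v1_eq (text : String) :
    HOMOGLYPHS.items.foldl
      (fun v1 p => if PySem.Str.isIn p.2 v1 then PySem.Str.replace v1 p.2 p.1 else v1) text
    = PySem.Str.join ""
        (text.toList.map (fun c => revMap.getD (String.ofList [c]) (String.ofList [c]))) := by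
  -- right-hand side: join of singleton strings is the map of revChar
  have rhs : PySem.Str.join ""
      (text.toList.map (fun c => revMap.getD (String.ofList [c]) (String.ofList [c])))
      = String.ofList (text.toList.map revChar) := by
    apply String.toList_inj.mp
    rw [PySem.Str.toList_join, String.toList_ofList]
    have : (text.toList.map (fun c => revMap.getD (String.ofList [c]) (String.ofList [c]))).map
        String.toList = (text.toList.map revChar).map (fun c => [c]) := by
      simp [List.map_map, Function.comp_def, revMap_getD]
    rw [this]
    simpa [List.map_map] using PySem.Chars.join_nil_singletons (text.toList.map revChar)
  -- left-hand side: unfold the nine-element fold and rewrite each pass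
  have hitems : HOMOGLYPHS.items
      = [("@","a"),("1","i"),("0","o"),("3","e"),("$","s"),("!","i"),("5","s"),("7","t"),("4","a")] := rfl
  rw [hitems]
  simp only [List.foldl]
  rw [stepEq _ "a" "@" 'a' '@' rfl rfl, stepEq _ "i" "1" 'i' '1' rfl rfl,
      stepEq _ "o" "0" 'o' '0' rfl rfl, stepEq _ "e" "3" 'e' '3' rfl rfl,
      stepEq _ "s" "$" 's' '$' rfl rfl, stepEq _ "i" "!" 'i' '!' rfl rfl,
      stepEq _ "s" "5" 's' '5' rfl rfl, stepEq _ "t" "7" 't' '7' rfl rfl,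
      stepEq _ "a" "4" 'a' '4' rfl rfl, rhs]
  simp only [String.toList_ofList, List.map_map]
  refine congrArg String.ofList (List.map_congr_left fun c _ => ?_)
  by_cases h1 : c = 'a'
  · subst h1; decide
  by_cases h2 : c = 'i'
  · subst h2; decide
  by_cases h3 : c = 'o'
  · subst h3; decide
  by_cases h4 : c = 'e'
  · subst h4; decide
  by_cases h5 : c = 's'
  · subst h5; decide
  by_cases h6 : c = 't'
  · subst h6; decide
  rw [Function.comp_apply, Function.comp_apply, Function.comp_apply, Function.comp_apply,
      Function.comp_apply, Function.comp_apply, Function.comp_apply, Function.comp_apply]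
  rw [if_neg h1]
  rw [if_neg h2, if_neg h3, if_neg h4, if_neg h5, if_neg h2, if_neg h5, if_neg h6, if_neg h1]
  simp [revChar, h1, h2, h3, h4, h5, h6]

theorem v2_eq (words : List String) (h : words.length > 2) :
    (words.set 0 (words.getD 1 "")).set 1 (words.getD 0 "")
      = [words.getD 1 "", words.getD 0 ""] ++ PySem.List.slice words (some 2) none := by
  match words, h with
  | w0 :: w1 :: rest, _ =>
    simp [PySem.List.slice]

-- ===== VERDICT (by name: the statement is the Claim_ definition above) =====
theorem generate_perturbations_spec : Claim_equal_generate_perturbations := by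
  unfold Claim_equal_generate_perturbations
  intro text _
  unfold Spec_generate_perturbations generate_perturbations generate_perturbations_alt
  rw [v1_eq text]
  by_cases h : (PySem.Str.split₀ text).length > 2
  · simp only [if_pos h, v2_eq _ h]
  · simp only [if_neg h]
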